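-- pv_equiv track=rewrite | github.com/turnstilelabs/arxitex | arxitex/tools/mentions/dataset/build_dataset.py | _split_paragraphs_with_index
-- ===== SOURCE A (Python) =====
-- from typing import Dict, List, Optional, Tuple
--
-- def _split_paragraphs_with_index(lines: List[str]) -> Tuple[List[str], List[int]]:
--     paragraphs: List[str] = []
--     line_to_para = [-1 for _ in lines]
--     current: List[str] = []
--     para_idx = -1
--     for i, line in enumerate(lines):
--         if line.strip():
--             if not current:
--                 para_idx += 1
--                 paragraphs.append("")
--             current.append(line.strip())
--             paragraphs[para_idx] = " ".join(current).strip()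
--             line_to_para[i] = para_idx
--         else:
--             current = []
--     return paragraphs, line_to_para
-- ===== SOURCE B (Python) =====
-- from itertools import groupby
-- from typing import List, Tuple
--
-- def _split_paragraphs_with_index(lines: List[str]) -> Tuple[List[str], List[int]]:
--     paragraphs: List[str] = []
--     line_to_para = [-1] * len(lines)
--     for is_text, group in groupby(enumerate(lines), key=lambda p: bool(p[1].strip())):
--         if not is_text:
--             continue
--         run = list(group)
--         paragraphs.append(" ".join(line.strip() for _, line in run).strip())
--         idx = len(paragraphs) - 1
--         for i, _ in run:
--             line_to_para[i] = idx
--     return paragraphs, line_to_para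
-- ===== Notes on version B (the rewrite author's own statement) =====
-- stated objective: faster
-- what changed: Replaces the stateful per-line scan (current buffer, para_idx counter, repeated in-place rewrite of the last paragraph) with run-grouping via itertools.groupby over enumerate(lines): each non-blank run is materialized, joined into its paragraph exactly once, and its line indices are assigned in an inner loop.
import Mathlib
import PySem

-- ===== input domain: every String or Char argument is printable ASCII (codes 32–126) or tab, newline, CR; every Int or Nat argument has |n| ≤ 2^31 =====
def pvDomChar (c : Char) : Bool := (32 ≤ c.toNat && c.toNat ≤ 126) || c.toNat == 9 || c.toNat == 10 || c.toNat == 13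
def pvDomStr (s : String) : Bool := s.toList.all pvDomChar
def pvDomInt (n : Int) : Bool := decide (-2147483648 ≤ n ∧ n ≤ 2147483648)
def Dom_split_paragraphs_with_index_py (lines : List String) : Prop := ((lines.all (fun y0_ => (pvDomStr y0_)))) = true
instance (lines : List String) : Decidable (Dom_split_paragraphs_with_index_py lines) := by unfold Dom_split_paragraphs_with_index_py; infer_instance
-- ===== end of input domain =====

-- B restructures A's stateful per-line scan into groupby-style run grouping; return values proved equal on all inputs.

-- truthiness of `line.strip()` (Python: a non-empty string is truthy); used by both ports
def pvText (s : String) : Bool := (PySem.Str.strip s).toList != []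

-- ===== PORT A =====
-- loop body of A's `for i, line in enumerate(lines)`; state = (paragraphs, line_to_para, current, para_idx)
def pvAstep (st : List String × List Int × List String × Int) (p : Int × String) :
    List String × List Int × List String × Int :=
  let (paragraphs, line_to_para, current, para_idx) := st
  if pvText p.2 then
    let (paragraphs, para_idx) :=
      if current = [] then (paragraphs ++ [""], para_idx + 1) else (paragraphs, para_idx)
    let current := current ++ [PySem.Str.strip p.2]
    let paragraphs := paragraphs.set para_idx.toNat
      (PySem.Str.strip (PySem.Str.join " " current))
    (paragraphs, line_to_para.set p.1.toNat para_idx, current, para_idx)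
  else
    (paragraphs, line_to_para, [], para_idx)

def split_paragraphs_with_index_py (lines : List String) : List String × List Int :=
  let r := (PySem.List.enumerate lines).foldl pvAstep
    ([], List.replicate lines.length (-1), [], -1)
  (r.1, r.2.1)

-- ===== PORT B =====
-- itertools.groupby(enumerate(lines), key = truthiness of line.strip()): maximal runs with their key
def pvRuns : List (Int × String) → List (Bool × List (Int × String))
  | [] => []
  | p :: t =>
    let k := pvText p.2
    (k, p :: t.takeWhile (fun q => pvText q.2 == k)) ::
      pvRuns (t.dropWhile (fun q => pvText q.2 == k))
termination_by l => l.length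
decreasing_by exact Nat.lt_succ_of_le (t.length_dropWhile_le _)

-- body of B's `for is_text, group in groupby(...)` loop; state = (paragraphs, line_to_para)
def pvBstep (st : List String × List Int) (g : Bool × List (Int × String)) :
    List String × List Int :=
  if g.1 then
    let paragraphs := st.1 ++
      [PySem.Str.strip (PySem.Str.join " " (g.2.map (fun p => PySem.Str.strip p.2)))]
    let idx : Int := (paragraphs.length : Int) - 1
    (paragraphs, g.2.foldl (fun m p => m.set p.1.toNat idx) st.2)
  else st

def split_paragraphs_with_index_py_alt (lines : List String) : List String × List Int :=
  (pvRuns (PySem.List.enumerate lines)).foldl pvBstep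
    ([], List.replicate lines.length (-1))

-- ===== PRECONDITION & SPEC =====
def Spec_split_paragraphs_with_index_py (lines : List String) (out : List String × List Int) : Prop := out = split_paragraphs_with_index_py_alt lines
instance (lines : List String) (out : List String × List Int) : Decidable (Spec_split_paragraphs_with_index_py lines out) := by unfold Spec_split_paragraphs_with_index_py; infer_instance

-- ===== CLAIM (what is proved, stated in full; the proofs are below) =====
def Claim_equal_split_paragraphs_with_index_py : Prop := ∀ (lines : List String), Dom_split_paragraphs_with_index_py lines → Spec_split_paragraphs_with_index_py lines (split_paragraphs_with_index_py lines)

-- ===== LEMMAS AND PROOFS =====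

-- the head of a non-empty dropWhile residue fails the predicate
theorem pv_dropWhile_head_false (P : Int × String → Bool) (t : List (Int × String))
    (b : Int × String) (rest : List (Int × String)) (hd : t.dropWhile P = b :: rest) :
    P b = false := by
  have hne : t.dropWhile P ≠ [] := by simp [hd]
  have := List.head_dropWhile_not (l := t) (p := P) hne
  simpa [hd] using this

-- setting the freshly appended last slot (paragraphs[para_idx] = …)
theorem pv_set_last (ps : List String) (a b : String) :
    (ps ++ [a]).set ps.length b = ps ++ [b] := by simp

-- A's loop over a run of blank lines leaves the state unchanged (current already [])
theorem pvA_blank_run (bs : List (Int × String)) (h : ∀ q ∈ bs, pvText q.2 = false)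
    (ps : List String) (m : List Int) (k : Int) :
    List.foldl pvAstep (ps, m, [], k) bs = (ps, m, [], k) := by
  induction bs with
  | nil => rfl
  | cons q t ih =>
    have hq : pvText q.2 = false := h q (by simp)
    simp only [List.foldl_cons, pvAstep, hq]
    exact ih (fun x hx => h x (by simp [hx]))

-- A's loop over a run of non-blank lines, mid-paragraph: the last paragraph is rebuilt
-- at every step, so only the final join survives; each index is mapped to para_idx
theorem pvA_text_run (r : List (Int × String)) (h : ∀ q ∈ r, pvText q.2 = true)
    (ps : List String) (m : List Int) (cur : List String) (hcur : cur ≠ []) :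
    List.foldl pvAstep
      (ps ++ [PySem.Str.strip (PySem.Str.join " " cur)], m, cur, (ps.length : Int)) r
    = (ps ++ [PySem.Str.strip (PySem.Str.join " "
          (cur ++ r.map (fun q => PySem.Str.strip q.2)))],
       r.foldl (fun m q => m.set q.1.toNat (ps.length : Int)) m,
       cur ++ r.map (fun q => PySem.Str.strip q.2), (ps.length : Int)) := by
  induction r generalizing m cur with
  | nil => simp
  | cons q t ih =>
    have hq : pvText q.2 = true := h q (by simp)
    simp only [List.foldl_cons, pvAstep, hq, if_true, hcur, if_false]
    rw [show ((ps.length : Int)).toNat = ps.length from Int.toNat_natCast _,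
        pv_set_last]
    have := ih (fun x hx => h x (by simp [hx])) (m.set q.1.toNat (ps.length : Int))
      (cur ++ [PySem.Str.strip q.2]) (by simp)
    simpa using this

-- on a run boundary (next line blank or end), the leftover `current` buffer is invisible
-- in the returned projections
theorem pvA_cur_proj (d : List (Int × String))
    (hd : ∀ b ∈ d.head?, pvText b.2 = false)
    (ps : List String) (m : List Int) (cur cur' : List String) (k : Int) :
    ((List.foldl pvAstep (ps, m, cur, k) d).1, (List.foldl pvAstep (ps, m, cur, k) d).2.1)
    = ((List.foldl pvAstep (ps, m, cur', k) d).1, (List.foldl pvAstep (ps, m, cur', k) d).2.1) := by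
  cases d with
  | nil => rfl
  | cons b rest =>
    have hb : pvText b.2 = false := hd b (by simp)
    simp [pvAstep, hb]

-- main correspondence: from a run boundary, A's per-line fold equals B's per-run fold
theorem pv_main (e : List (Int × String)) : ∀ (ps : List String) (m : List Int),
    ((List.foldl pvAstep (ps, m, [], (ps.length : Int) - 1) e).1,
     (List.foldl pvAstep (ps, m, [], (ps.length : Int) - 1) e).2.1)
    = List.foldl pvBstep (ps, m) (pvRuns e) := by
  induction e using pvRuns.induct with
  | case1 => intro ps m; simp [pvRuns]
  | case2 p t k ih =>
    intro ps m
    have ih' := ih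
    simp only [show k = pvText p.2 from rfl] at ih'
    rw [pvRuns]
    cases hp : pvText p.2 with
    | false =>
      simp only [hp] at ih' ⊢
      have htk : ∀ q ∈ t.takeWhile (fun q => pvText q.2 == false), pvText q.2 = false := by
        intro q hq
        have := List.mem_takeWhile_imp hq
        simpa using this
      rw [← List.takeWhile_append_dropWhile (p := fun q => pvText q.2 == false) (l := t)]
      simp only [List.foldl_cons, List.foldl_append]
      have hstep : pvAstep (ps, m, [], (ps.length : Int) - 1) p
          = (ps, m, [], (ps.length : Int) - 1) := by
        simp [pvAstep, hp]
      rw [hstep, pvA_blank_run _ htk]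
      simp only [List.takeWhile_append_dropWhile]
      rw [ih' ps m]
      simp [pvBstep]
    | true =>
      simp only [hp] at ih' ⊢
      have htk : ∀ q ∈ t.takeWhile (fun q => pvText q.2 == true), pvText q.2 = true := by
        intro q hq
        have := List.mem_takeWhile_imp hq
        simpa using this
      have hstep : pvAstep (ps, m, [], (ps.length : Int) - 1) p
          = (ps ++ [PySem.Str.strip (PySem.Str.join " " [PySem.Str.strip p.2])],
             m.set p.1.toNat (ps.length : Int), [PySem.Str.strip p.2], (ps.length : Int)) := by
        simp [pvAstep, hp, sub_add_cancel]
      rw [← List.takeWhile_append_dropWhile (p := fun q => pvText q.2 == true) (l := t)]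
      simp only [List.foldl_cons, List.foldl_append]
      rw [hstep, pvA_text_run _ htk ps _ _ (by simp)]
      simp only [List.takeWhile_append_dropWhile]
      have hB : pvBstep (ps, m) (true, p :: t.takeWhile (fun q => pvText q.2 == true))
          = (ps ++ [PySem.Str.strip (PySem.Str.join " "
               ([PySem.Str.strip p.2] ++ (t.takeWhile (fun q => pvText q.2 == true)).map (fun q => PySem.Str.strip q.2)))],
             (t.takeWhile (fun q => pvText q.2 == true)).foldl
               (fun m q => m.set q.1.toNat (ps.length : Int)) (m.set p.1.toNat (ps.length : Int))) := by
        simp [pvBstep]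
      rw [hB]
      cases hd : List.dropWhile (fun q => pvText q.2 == true) t with
      | nil => simp [pvRuns]
      | cons b rest =>
        have hb : pvText b.2 = false := by
          simpa using pv_dropWhile_head_false _ t b rest hd
        rw [pvA_cur_proj (b :: rest) (by simpa using hb) _ _ _ []]
        have := ih' (ps ++ [PySem.Str.strip (PySem.Str.join " "
            ([PySem.Str.strip p.2] ++ (t.takeWhile (fun q => pvText q.2 == true)).map (fun q => PySem.Str.strip q.2)))])
          ((t.takeWhile (fun q => pvText q.2 == true)).foldl
            (fun m q => m.set q.1.toNat (ps.length : Int)) (m.set p.1.toNat (ps.length : Int)))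
        rw [hd] at this
        simpa using this

-- ===== VERDICT (by name: the statement is the Claim_ definition above) =====
theorem split_paragraphs_with_index_py_spec : Claim_equal_split_paragraphs_with_index_py := by
  intro lines _
  unfold Spec_split_paragraphs_with_index_py split_paragraphs_with_index_py split_paragraphs_with_index_py_alt
  simpa using pv_main (PySem.List.enumerate lines) [] (List.replicate lines.length (-1))
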